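-- pv_equiv track=rewrite | github.com/vishnudk/OA2021B3 | b_file_name/solutionPython.py | function
-- ===== SOURCE A (Python) =====
-- def function(str,l):
--    str = list(str)
--    count = 0
--    prv = 0
--    while prv != l:
--       i = 0
--       while i < len(str):
--          if i+2 < len(str):
--             if  str[i]=='x' and str[i+1]=='x' and str[i+2]=='x':
--                str.pop(i)
--                count = count + 1
--                continue
--          i = i+1
--       prv = l
--       l = len(str)
--    return count
-- ===== SOURCE B (Python) =====
-- def function(str, l):
--     # One pass over maximal runs of 'x': each run of length k contributes max(0, k-2).
--     if l == 0:
--         return 0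
--     count = 0
--     run = 0
--     for ch in str:
--         if ch == 'x':
--             run += 1
--         else:
--             count += max(run - 2, 0)
--             run = 0
--     return count + max(run - 2, 0)
-- ===== Notes on version B (the rewrite author's own statement) =====
-- stated objective: faster
-- what changed: Replaced the repeated pop-and-rescan passes (each pop shifts the list) by a single left-to-right pass that sums max(0, runlen-2) over maximal runs of 'x', keeping A's quirk of returning 0 when the l argument is 0.
import Mathlib
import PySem

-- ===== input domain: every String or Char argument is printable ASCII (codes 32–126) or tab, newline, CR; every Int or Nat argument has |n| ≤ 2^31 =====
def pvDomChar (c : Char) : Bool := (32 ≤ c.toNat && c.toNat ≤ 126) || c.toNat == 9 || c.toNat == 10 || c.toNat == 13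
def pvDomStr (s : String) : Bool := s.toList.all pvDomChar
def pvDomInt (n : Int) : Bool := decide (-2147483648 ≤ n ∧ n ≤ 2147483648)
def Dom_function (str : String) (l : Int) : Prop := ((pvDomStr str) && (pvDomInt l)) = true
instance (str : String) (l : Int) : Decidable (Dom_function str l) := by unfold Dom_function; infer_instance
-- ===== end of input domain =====

-- B replaces A's repeated pop-and-rescan passes by one pass summing max(0, runlen-2)
-- over maximal runs of 'x' (objective: faster, O(n) instead of O(n^2)).

-- ===== PORT A =====
-- inner 'while i < len(str)' loop; i starts at 0 and only grows, so it is a Nat here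
-- (s[i]? equals Python's str[i] for the in-range nonnegative indexes the loop uses).
-- 'fuel' is only a totality guard: every iteration decreases s.length - i, so
-- fuel = s.length (the value passed below) is never exhausted.
def innerLoop : Nat → List Char → Nat → Int → List Char × Int
  | 0, s, _, count => (s, count)
  | fuel+1, s, i, count =>
    if i < s.length then
      if i + 2 < s.length ∧ s[i]? = some 'x' ∧ s[i+1]? = some 'x' ∧ s[i+2]? = some 'x' then
        innerLoop fuel (s.eraseIdx i) i (count + 1)   -- str.pop(i); count += 1; continue
      else
        innerLoop fuel s (i + 1) count
    else (s, count)

theorem innerLoop_len_le (fuel : Nat) : ∀ (s : List Char) (i : Nat) (count : Int),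
    (innerLoop fuel s i count).1.length ≤ s.length := by
  induction fuel with
  | zero => intro s i count; rw [innerLoop]
  | succ f ih =>
      intro s i count
      rw [innerLoop]
      by_cases h : i < s.length
      · rw [if_pos h]
        split
        · have h1 := List.length_eraseIdx_of_lt (l := s) (i := i) h
          have h2 := ih (s.eraseIdx i) i (count + 1)
          omega
        · exact ih s (i + 1) count
      · rw [if_neg h]

-- outer 'while prv != l' loop
def outerLoop (s : List Char) (count : Int) (prv l : Int) : List Char × Int :=
  if prv ≠ l then
    let p := innerLoop s.length s 0 count
    outerLoop p.1 p.2 l (p.1.length : Int)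
  else (s, count)
termination_by (s.length, (if l = (s.length : Int) then 0 else 1) + (if prv = l then 0 else 1))
decreasing_by
  have hle := innerLoop_len_le s.length s 0 count
  rcases lt_or_eq_of_le hle with h | h
  · exact Prod.Lex.left _ _ h
  · rw [h]
    apply Prod.Lex.right
    split_ifs <;> omega

def function (str : String) (l : Int) : Int :=
  (outerLoop str.toList 0 0 l).2

-- ===== PORT B =====
def bStep (p : Int × Int) (ch : Char) : Int × Int :=
  if ch = 'x' then (p.1, p.2 + 1) else (p.1 + max (p.2 - 2) 0, 0)

def function_alt (str : String) (l : Int) : Int :=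
  if l = 0 then 0
  else
    let p := str.toList.foldl bStep (0, 0)
    p.1 + max (p.2 - 2) 0

-- ===== PRECONDITION & SPEC =====
def Spec_function (str : String) (l : Int) (out : Int) : Prop := out = function_alt str l
instance (str : String) (l : Int) (out : Int) : Decidable (Spec_function str l out) := by unfold Spec_function; infer_instance

-- ===== CLAIM (what is proved, stated in full; the proofs are below) =====
def Claim_equal_function : Prop := ∀ (str : String) (l : Int), Dom_function str l → Spec_function str l (function str l)

-- ===== LEMMAS AND PROOFS =====

-- the string left by one full inner pass
def redF : List Char → List Char
  | c :: a :: b :: t' =>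
    if c = 'x' ∧ a = 'x' ∧ b = 'x' then redF ('x' :: 'x' :: t') else c :: redF (a :: b :: t')
  | c :: t => c :: redF t
  | [] => []
termination_by s => s.length

-- the deletions counted by one full inner pass
def redG : List Char → Int
  | c :: a :: b :: t' =>
    if c = 'x' ∧ a = 'x' ∧ b = 'x' then 1 + redG ('x' :: 'x' :: t') else redG (a :: b :: t')
  | _ :: t => redG t
  | [] => 0
termination_by s => s.length

def hasTriple : List Char → Bool
  | a :: b :: c :: t => (a = 'x' && b = 'x' && c = 'x') || hasTriple (b :: c :: t)
  | _ => false
termination_by s => s.length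

-- concrete shapes of redF / redG on short lists
theorem redF_nil : redF [] = [] := by rw [redF]
theorem redF_single (c : Char) : redF [c] = [c] := by rw [redF, redF] <;> simp
theorem redF_pair (c d : Char) : redF [c, d] = [c, d] := by rw [redF, redF, redF] <;> simp
theorem redG_nil : redG [] = 0 := by rw [redG]
theorem redG_single (c : Char) : redG [c] = 0 := by rw [redG, redG] <;> simp
theorem redG_pair (c d : Char) : redG [c, d] = 0 := by rw [redG, redG, redG] <;> simp
theorem hasTriple_nil : hasTriple [] = false := by rw [hasTriple] <;> simp
theorem hasTriple_one (c : Char) : hasTriple [c] = false := by rw [hasTriple] <;> simp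
theorem hasTriple_two (c d : Char) : hasTriple [c, d] = false := by rw [hasTriple] <;> simp

theorem innerLoop_eq (fuel : Nat) : ∀ (s : List Char) (i : Nat) (count : Int),
    s.length - i ≤ fuel →
    innerLoop fuel s i count = (s.take i ++ redF (s.drop i), count + redG (s.drop i)) := by
  induction fuel with
  | zero =>
      intro s i count hf
      rw [innerLoop]
      have hsl : s.length ≤ i := by omega
      rw [List.drop_eq_nil_of_le hsl, List.take_of_length_le hsl, redF_nil, redG_nil]
      simp
  | succ f ihf =>
      intro s i count hf
      by_cases h : i < s.length
      case neg =>
        rw [innerLoop, if_neg h]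
        have hsl : s.length ≤ i := by omega
        rw [List.drop_eq_nil_of_le hsl, List.take_of_length_le hsl, redF_nil, redG_nil]
        simp
      case pos =>
      by_cases hx : i + 2 < s.length ∧ s[i]? = some 'x' ∧ s[i+1]? = some 'x' ∧ s[i+2]? = some 'x'
      case pos =>
        have herase := List.length_eraseIdx_of_lt (l := s) (i := i) h
        rw [innerLoop, if_pos h, if_pos hx, ihf (s.eraseIdx i) i (count + 1) (by omega)]
        obtain ⟨h2, ha, hb, hc⟩ := hx
        have hai : s[i] = 'x' := by simpa [List.getElem?_eq_getElem (show i < s.length by omega)] using ha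
        have hbi : s[i+1] = 'x' := by simpa [List.getElem?_eq_getElem (show i+1 < s.length by omega)] using hb
        have hci : s[i+2] = 'x' := by simpa [List.getElem?_eq_getElem (show i+2 < s.length by omega)] using hc
        have hlen1 : (s.take i).length = i := by simp; omega
        have htake : (s.eraseIdx i).take i = s.take i := by
          rw [List.eraseIdx_eq_take_drop_succ, List.take_append_of_le_length (by omega)]
          simp [List.take_take]
        have hdrop : (s.eraseIdx i).drop i = s.drop (i+1) := by
          rw [List.eraseIdx_eq_take_drop_succ, List.drop_append_of_le_length (by omega)]
          rw [List.drop_eq_nil_of_le (by omega), List.nil_append]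
        have hd : s.drop i = 'x' :: 'x' :: 'x' :: s.drop (i+3) := by
          rw [List.drop_eq_getElem_cons (show i < s.length by omega),
              List.drop_eq_getElem_cons (show i+1 < s.length by omega),
              List.drop_eq_getElem_cons (show i+2 < s.length by omega), hai, hbi, hci]
        have hd1 : s.drop (i+1) = 'x' :: 'x' :: s.drop (i+3) := by
          rw [List.drop_eq_getElem_cons (show i+1 < s.length by omega),
              List.drop_eq_getElem_cons (show i+2 < s.length by omega), hbi, hci]
        rw [htake, hdrop, hd, hd1]
        rw [redF, redG, if_pos ⟨rfl, rfl, rfl⟩, if_pos ⟨rfl, rfl, rfl⟩]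
        refine Prod.ext rfl ?_
        simp only []
        ring
      case neg =>
        rw [innerLoop, if_pos h, if_neg hx, ihf s (i+1) count (by omega)]
        have hd : s.drop i = s[i] :: s.drop (i+1) := List.drop_eq_getElem_cons h
        have htake : s.take (i+1) = s.take i ++ [s[i]] := by
          rw [List.take_add_one]; simp [List.getElem?_eq_getElem h]
        rcases hdrop1 : s.drop (i+1) with _ | ⟨a, t⟩
        · rw [hd, hdrop1, htake, redF_nil, redF_single, redG_nil, redG_single]
          refine Prod.ext ?_ rfl
          simp only [List.append_assoc, List.singleton_append, List.append_nil]
        · rcases t with _ | ⟨b, t'⟩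
          · rw [hd, hdrop1, htake, redF_single, redF_pair, redG_single, redG_pair]
            refine Prod.ext ?_ rfl
            simp only [List.append_assoc, List.singleton_append]
          · have hlen : i + 2 < s.length := by
              have := congrArg List.length hdrop1
              simp at this; omega
            have h4 := List.drop_eq_getElem_cons (l := s) (i := i+1) (show i+1 < s.length by omega)
            rw [hdrop1] at h4
            injection h4 with ha2 h4b
            have h5 := List.drop_eq_getElem_cons (l := s) (i := i+2) (by omega)
            rw [← h4b] at h5
            injection h5 with hb2 _
            have hnx : ¬ (s[i] = 'x' ∧ a = 'x' ∧ b = 'x') := by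
              intro ⟨p1, p2, p3⟩
              exact hx ⟨hlen, by simp [List.getElem?_eq_getElem h, p1],
                by simp [List.getElem?_eq_getElem (show i+1 < s.length by omega), ← ha2, p2],
                by simp [List.getElem?_eq_getElem hlen, ← hb2, p3]⟩
            have hF : redF (s[i] :: a :: b :: t') = s[i] :: redF (a :: b :: t') := by
              rw [redF, if_neg hnx]
            have hG : redG (s[i] :: a :: b :: t') = redG (a :: b :: t') := by
              rw [redG, if_neg hnx]
            rw [hd, hdrop1, htake, hF, hG]
            refine Prod.ext ?_ rfl
            simp only [List.append_assoc, List.singleton_append]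

theorem redF_head? (s : List Char) : (redF s).head? = s.head? := by
  induction s using redF.induct with
  | case1 c a b t' h ih =>
      rw [redF, if_pos h, ih]; simp [h.1]
  | case2 c a b t' h ih => rw [redF, if_neg h]; rfl
  | case3 c t h ih =>
      rcases t with _ | ⟨a, t2⟩
      · rw [redF_single]
      · rcases t2 with _ | ⟨b, t3⟩
        · rw [redF_pair]
        · exact absurd rfl (h a b t3)
  | case4 => rw [redF_nil]

-- redG drops a non-'x' head
theorem redG_cons_ne (c : Char) (t : List Char) (hc : c ≠ 'x') : redG (c :: t) = redG t := by
  rcases t with _ | ⟨a, t2⟩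
  · rw [redG_single, redG_nil]
  · rcases t2 with _ | ⟨b, t3⟩
    · rw [redG_pair, redG_single]
    · rw [redG, if_neg (fun hh => hc hh.1)]

theorem redG_xx (ys : List Char) (hy : ys.head? ≠ some 'x') :
    redG ('x' :: 'x' :: ys) = redG ys := by
  rcases ys with _ | ⟨a, t⟩
  · rw [redG_pair, redG_nil]
  · have hax : a ≠ 'x' := by simpa using hy
    rw [redG, if_neg (fun hh => hax hh.2.2)]
    rcases t with _ | ⟨b, t2⟩
    · rw [redG_pair, redG_single]
    · rw [redG, if_neg (fun hh => hax hh.2.1)]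

theorem redG_repl (r : Nat) (ys : List Char) (hy : ys.head? ≠ some 'x') :
    redG (List.replicate r 'x' ++ ys) = max ((r : Int) - 2) 0 + redG ys := by
  induction r with
  | zero => simp
  | succ k ih =>
    rcases k with _ | ⟨_ | k2⟩
    · -- prefix ['x']
      simp only [List.replicate_succ, List.replicate_zero, List.nil_append, List.cons_append]
      rcases ys with _ | ⟨a, t⟩
      · rw [redG_single, redG_nil]; norm_num
      · have hax : a ≠ 'x' := by simpa using hy
        rcases t with _ | ⟨b, t2⟩
        · rw [redG_pair, redG_single]; norm_num
        · rw [redG, if_neg (fun hh => hax hh.2.1)]; norm_num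
    · -- prefix ['x','x']
      simp only [List.replicate_succ, List.replicate_zero, List.nil_append, List.cons_append]
      rw [redG_xx ys hy]; norm_num
    · -- r = k2+3 ≥ 3 : triple at the head
      have h3 : List.replicate (k2+3) 'x' ++ ys = 'x' :: 'x' :: 'x' :: (List.replicate k2 'x' ++ ys) := by
        simp [List.replicate_succ]
      have h2 : List.replicate (k2+2) 'x' ++ ys = 'x' :: 'x' :: (List.replicate k2 'x' ++ ys) := by
        simp [List.replicate_succ]
      rw [h3, redG, if_pos ⟨rfl, rfl, rfl⟩, ← h2, ih]
      push_cast; omega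

theorem hasTriple_redF (s : List Char) : hasTriple (redF s) = false := by
  induction s using redF.induct with
  | case1 c a b t' h ih => rw [redF, if_pos h]; exact ih
  | case2 c a b t' h ih =>
      rw [redF, if_neg h]
      have hhead : (redF (a :: b :: t')).head? = some a := by rw [redF_head?]; rfl
      rcases hLv : redF (a :: b :: t') with _ | ⟨p, q⟩
      · rw [hasTriple_one]
      · rcases q with _ | ⟨p2, q2⟩
        · rw [hasTriple_two]
        · have hp : p = a := by rw [hLv] at hhead; simpa using hhead
          rw [hLv] at ih
          rw [hasTriple, ih, Bool.or_false]
          by_cases hcx : c = 'x'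
          · by_cases hax : a = 'x'
            · have hbx : b ≠ 'x' := fun hb => h ⟨hcx, hax, hb⟩
              have hL2 : redF (a :: b :: t') = a :: redF (b :: t') := by
                rcases t' with _ | ⟨v, t''⟩
                · rw [redF_pair, redF_single]
                · rw [redF, if_neg (fun hh => hbx hh.2.1)]
              rw [hL2] at hLv
              injection hLv with h5 h6
              have hhead2 : (redF (b :: t')).head? = some b := by rw [redF_head?]; rfl
              rw [h6] at hhead2
              have hp2 : p2 = b := by simpa using hhead2
              simp [hp2, hbx]
            · simp [hp, hax]
          · simp [hcx]
  | case3 c t h ih =>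
      rcases t with _ | ⟨a, t2⟩
      · rw [redF_single, hasTriple_one]
      · rcases t2 with _ | ⟨b, t3⟩
        · rw [redF_pair, hasTriple_two]
        · exact absurd rfl (h a b t3)
  | case4 => rw [redF_nil, hasTriple_nil]

theorem redF_of_noTriple (s : List Char) : hasTriple s = false → redF s = s := by
  induction s using redF.induct with
  | case1 c a b t' hx ih =>
      intro h; exfalso
      rw [hasTriple] at h
      simp [hx.1, hx.2.1, hx.2.2] at h
  | case2 c a b t' hx ih =>
      intro h
      rw [hasTriple, Bool.or_eq_false_iff] at h
      rw [redF, if_neg hx, ih h.2]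
  | case3 c t hsh ih =>
      intro _
      rcases t with _ | ⟨a, t2⟩
      · rw [redF_single]
      · rcases t2 with _ | ⟨b, t3⟩
        · rw [redF_pair]
        · exact absurd rfl (hsh a b t3)
  | case4 => intro _; rw [redF_nil]

theorem redG_of_noTriple (s : List Char) : hasTriple s = false → redG s = 0 := by
  induction s using redF.induct with
  | case1 c a b t' hx ih =>
      intro h; exfalso
      rw [hasTriple] at h
      simp [hx.1, hx.2.1, hx.2.2] at h
  | case2 c a b t' hx ih =>
      intro h
      rw [hasTriple, Bool.or_eq_false_iff] at h
      rw [redG, if_neg hx, ih h.2]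
  | case3 c t hsh ih =>
      intro _
      rcases t with _ | ⟨a, t2⟩
      · rw [redG_single]
      · rcases t2 with _ | ⟨b, t3⟩
        · rw [redG_pair]
        · exact absurd rfl (hsh a b t3)
  | case4 => intro _; rw [redG_nil]

theorem foldl_run (xs : List Char) : ∀ (c : Int) (r : Nat),
    (xs.foldl bStep (c, (r : Int))).1 + max ((xs.foldl bStep (c, (r : Int))).2 - 2) 0
      = c + redG (List.replicate r 'x' ++ xs) := by
  induction xs with
  | nil =>
      intro c r
      simp only [List.foldl_nil]
      rw [redG_repl r [] (by simp), redG_nil]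
      ring
  | cons ch t ih =>
      intro c r
      by_cases hch : ch = 'x'
      · subst hch
        simp only [List.foldl_cons, bStep, eq_self_iff_true, if_true]
        have ih1 := ih c (r+1)
        have hc1 : ((r+1 : Nat) : Int) = (r : Int) + 1 := by push_cast; ring
        rw [hc1] at ih1
        rw [ih1]
        congr 1
        rw [List.replicate_succ']
        simp
      · simp only [List.foldl_cons, bStep, if_neg hch]
        have ih0 := ih (c + max ((r : Int) - 2) 0) 0
        simp only [Nat.cast_zero] at ih0
        rw [ih0, redG_repl r (ch :: t) (by simpa using hch)]
        simp only [List.replicate_zero, List.nil_append]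
        rw [redG_cons_ne ch t hch]
        ring

theorem innerLoop_zero (s : List Char) (c : Int) :
    innerLoop s.length s 0 c = (redF s, c + redG s) := by
  rw [innerLoop_eq s.length s 0 c (by omega)]; simp

theorem function_eq_redG (str : String) (l : Int) (hl : l ≠ 0) :
    function str l = redG str.toList := by
  have h1 : hasTriple (redF str.toList) = false := hasTriple_redF str.toList
  have hFF : redF (redF str.toList) = redF str.toList := redF_of_noTriple _ h1
  have hGF : redG (redF str.toList) = 0 := redG_of_noTriple _ h1
  unfold function
  rw [outerLoop, if_pos (show (0 : Int) ≠ l from fun h => hl h.symm)]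
  simp only [innerLoop_zero, zero_add]
  by_cases h2 : l = ((redF str.toList).length : Int)
  · rw [outerLoop, if_neg (by simp [h2])]
  · rw [outerLoop, if_pos h2]
    simp only [innerLoop_zero, hFF, hGF, add_zero]
    rw [outerLoop, if_neg (by simp)]

-- ===== VERDICT (by name: the statement is the Claim_ definition above) =====
theorem function_spec : Claim_equal_function := by
  intro str l _
  unfold Spec_function function_alt
  by_cases hl : l = 0
  · subst hl
    rw [if_pos rfl]
    unfold function
    rw [outerLoop, if_neg (by simp)]
  · rw [if_neg hl, function_eq_redG str l hl]
    have hfr := foldl_run str.toList 0 0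
    simp only [Nat.cast_zero, List.replicate_zero, List.nil_append, zero_add] at hfr
    exact hfr.symm
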